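/- GENERATED by mk_final_copies.py from the proof of the farm's unit `start_decoder.R15` (farm:start_decoder.R15.1: Lemmas.lean) as the
   re-elaboration sweep compiled it — do not edit. -/
import Asan.CheckWalk
import Vorbis.Spec.Units.start_decoder_R15

open X86 X86.User Asan Vorbis Vorbis.Spec Vorbis.Spec.StartDecoder

set_option maxRecDepth 4000
set_option maxHeartbeats 4000000

/-!
  The PURE part of segment `start_decoder.R15` (no machine steps): what is carried over the segment's stores and over the two
  `init_blocksize` calls, and the assembly of R17's entry assertion.

      f_where', f_where, obj_live      where `*f` is (off the function's own stack), `*f` inside one live object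
      chan_carry_stack                 the loop assertion `ChanLoop` over pushes below the steady stack pointer (the exit to R16)
      lt_of_branch, channels_word, bsize0_word … r13_val, r15_val, slot_word, rsp_word
                                       the walker's words / loads as the invariant's numbers
      mid_carry_alloc                  `Mid` OVER AN ALLOCATING CALLEE: `Mid.frame` + `Mid.grow` in one step (neither applies alone)
      Benign, Carried                  the spans the segment may write; the state-independent part of its assertions (SD.10 … SD.11)
      core_of_chan, core_keep, core_carry, core_carry_plain, bsize_keep
                                       the carry lemmas of `Carried`
      Tabs, tabs_keep, core_after_ib   the tables of one `init_blocksize`; `Carried` + the earlier tables after a call returned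
      AtRetIB, bodyERR_of_core, r17_of_core
                                       the assertion after a call returned; the error exit; SD.11 (`Late`, `OwnAll`, `EstLoop`) assembled
-/

namespace Vorbis.Spec.start_decoder_R15

/-- **Where `*f` is** while start_decoder runs: in the data space, above the text, and off the function's own stack
`[.., RA + 8)`: it is an object of a caller's protected frame (above the return-address slot) or no stack object at all. -/
theorem f_where' {g : Ghost} {A : Arena × List Obj} {mem : Mem}
    (hshadow : ShadowInv A.2 g.frames' g.R mem) (hofftext : ∀ o, o ∈ A.2 → L.textHi ≤ o.base)
    (hcallers : ∀ bF, bF ∈ g.frames → g.RA + 8 ≤ bF.1) (hh : g.Hand A) :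
    0x119d40 ≤ g.f ∧ g.f + 1808 ≤ 0xC00000 ∧ (g.RA + 8 ≤ g.f ∨ g.f + 1808 ≤ 0x700000 ∨ 0x800000 ≤ g.f) := by
  have hsub : ∀ o, o ∈ stackObjs g.frames ++ A.2 → o ∈ stackObjs g.frames' ++ A.2 := by
    intro o ho
    unfold Ghost.frames'
    rw [stackObjs_cons]
    rcases List.mem_append.mp ho with h1 | h2
    · exact List.mem_append_left _ (List.mem_append_right _ h1)
    · exact List.mem_append_right _ h2
  have hobj : LiveIn A.2 g.frames' g.f Off.sizeof.stb_vorbis := by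
    obtain ⟨o, ho, h1, h2⟩ := hh.obj
    exact ⟨o, hsub o ho, h1, h2⟩
  have hw := hobj.where_ hshadow hofftext (by simp only [voff]; omega)
  simp only [voff] at hw
  obtain ⟨w1, w2, _⟩ := hw
  refine ⟨w1, w2, ?_⟩
  obtain ⟨o, ho, k1, k2⟩ := hh.obj
  simp only [voff] at k2
  rcases List.mem_append.mp ho with hs | hoth
  · left
    unfold stackObjs at hs
    obtain ⟨bF, hbF, hin⟩ := List.mem_flatMap.mp hs
    have hmem : bF ∈ g.frames' := List.mem_cons_of_mem _ hbF
    obtain ⟨a1, a2, _, _, _⟩ := hshadow.stack.active bF hmem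
    have hg := FrameLayout.objsAt_gran a1 a2 hin
    have hc := hcallers bF hbF
    have e : o.gLo = o.base / 8 := rfl
    omega
  · right
    have := hshadow.off o hoth
    unfold OffStack at this
    omega

/-- `f_where'` from a cut point's `Frame`. -/
theorem f_where {u₀ : State} {g : Ghost} {pc : Word} {A : Arena × List Obj} {v : State}
    (hfr : Frame u₀ g pc A v) (hh : g.Hand A) :
    0x119d40 ≤ g.f ∧ g.f + 1808 ≤ 0xC00000 ∧ (g.RA + 8 ≤ g.f ∨ g.f + 1808 ≤ 0x700000 ∨ 0x800000 ≤ g.f) :=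
  f_where' hfr.shadow hfr.offText hfr.callers hh

/-- **The channel loop's assertion over stores BELOW the steady stack pointer** (the return address of a check call, a callee that
only uses its own stack): every span lies in `[RA − 1888, R)`, so `*f`, every block, the frame's slots, the text, the globals
and the shadow read the same. -/
theorem chan_carry_stack {u₀ : State} {g : Ghost} {pc pc' : Word} {i : Nat} {A9 : Arena} {A : Arena × List Obj} {v s : State}
    (h : ChanLoop u₀ g pc i A9 A v) {ws : List Span} (hs : Mem.SameExcept ws v.mem s.mem)
    (hws : ∀ w, w ∈ ws → g.RA - 1888 ≤ w.lo ∧ w.hi ≤ g.R)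
    (hrip : s.rip = pc') (hrsp : s.reg .rsp = addr g.R) (hrbp : s.reg .rbp = addr g.f) (hr14 : s.reg .r14 = addr i)
    (hinv : abiInv s) : ChanLoop u₀ g pc' i A9 A s := by
  have hfr := h.frame
  obtain ⟨hR1, hR8⟩ := hfr.r_eq
  obtain ⟨_, hra1, hra2⟩ := hfr.ra
  simp only [depth, steady] at hR1 hra1
  obtain ⟨hf1, hf2, hf3⟩ := f_where hfr h.hand
  -- the two regions off the spans
  have hE : Mem.EqOn g.R (2 ^ 64) v.mem s.mem := by
    apply hs.eqOn
    intro w hw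
    exact Or.inr (hws w hw).2
  have hB : Mem.EqOn 0 (g.RA - 1888) v.mem s.mem := by
    apply hs.eqOn
    intro w hw
    exact Or.inl (hws w hw).1
  have hsh : Mem.EqOn 0xC00000 0xE00000 v.mem s.mem := hE.mono (by omega) (by omega)
  -- `*f` reads the same
  have hos : ObjSame g.f v.mem s.mem := by
    apply ObjSame.of_sameExcept hs (by simp only [voff]; omega)
    intro w hw
    have := hws w hw
    omega
  have hkept : AllKept A.1.Blk v.mem s.mem := by
    apply h.mid.arena.allKept_of_stack hs
    intro w hw
    have := hws w hw
    omega
  have harena : ArenaOK A.1 A.2 s.mem g.f := by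
    apply h.mid.arena.frame (by simp only [voff]; omega)
    apply hs.eqOn
    intro w hw
    have := hws w hw
    simp only [voff]
    omega
  have hwins : Mid.winsAt 9 10 = [(0, 8), (24, 48), (152, 868), (1400, 1480), (1749, 1750), (1784, 1788)] := by
    decide
  have hmid : Mid g 9 9 10 A9 A s.mem := by
    apply h.mid.frame
    · apply ObjEq.of_sameExcept hs
      · intro w hw
        rw [hwins] at hw
        simp only [List.mem_cons, List.mem_nil_iff, or_false] at hw
        rcases hw with rfl | rfl | rfl | rfl | rfl | rfl <;> simp only [] <;> omega
      · intro w hw sp hsp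
        have := hws sp hsp
        rw [hwins] at hw
        simp only [List.mem_cons, List.mem_nil_iff, or_false] at hw
        rcases hw with rfl | rfl | rfl | rfl | rfl | rfl <;> simp only [] <;> omega
    · intro B hB
      exact hkept B (hB.mono h.mid.extc)
    · exact h.mid.consts.frame (hE.mono (by omega) (by omega)) (by omega)
    · intro _ _
      exact hE.i32 (g.R + 0x28) (by omega) (by omega) (Nat.le_refl _)
    · exact hsh
    · exact harena
    · exact h.mid.bits.frame hos
  have ech : stb_vorbis.channels s.mem g.f = stb_vorbis.channels v.mem g.f := by
    simp only [vacc, voff]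
    exact hos.i32 4 (by decide)
  have eb1 : stb_vorbis.blocksize_1 s.mem g.f = stb_vorbis.blocksize_1 v.mem g.f := by
    simp only [vacc, voff]
    exact hos.i32 156 (by decide)
  have h16 := h.mid.header.HD1.2
  have hile := h.i_le
  refine ⟨?_, h.hand, hmid, hrbp, hr14, ?_, ?_, ?_, ?_⟩
  · -- the frame
    refine ⟨hfr.entry, hrip, hrsp, ?_, ?_, ?_, ?_, ?_, ?_, ?_, ?_, ?_, hinv, ?_, hfr.offText, hfr.ext, hfr.callers, ?_, ?_⟩
    · rw [hE.u64 (g.R + 8) (by omega) (by omega) (Nat.le_refl _)]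
      exact hfr.shadowIdx
    · rw [hE.u64 (g.R + 0x598) (by omega) (by omega) (Nat.le_refl _)]
      exact hfr.saved_rbx
    · rw [hE.u64 (g.R + 0x5a0) (by omega) (by omega) (Nat.le_refl _)]
      exact hfr.saved_rbp
    · rw [hE.u64 (g.R + 0x5a8) (by omega) (by omega) (Nat.le_refl _)]
      exact hfr.saved_r12
    · rw [hE.u64 (g.R + 0x5b0) (by omega) (by omega) (Nat.le_refl _)]
      exact hfr.saved_r13
    · rw [hE.u64 (g.R + 0x5b8) (by omega) (by omega) (Nat.le_refl _)]
      exact hfr.saved_r14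
    · rw [hE.u64 (g.R + 0x5c0) (by omega) (by omega) (Nat.le_refl _)]
      exact hfr.saved_r15
    · rw [hE.u64 (g.R + 0x5c8) (by omega) (by omega) (Nat.le_refl _)]
      exact hfr.saved_ra
    · show Mem.EqOn L.textLo L.textHi u₀.mem s.mem
      have hc : Mem.EqOn L.textLo L.textHi u₀.mem v.mem := hfr.code
      apply hc.trans
      apply hB.mono (Nat.zero_le _)
      have e : L.textHi = 0x119d40 := rfl
      omega
    · exact hfr.shadow.untouched hsh
    · intro j hj
      have h0 := hfr.sh7 j hj
      rw [← h0]
      apply hB.readLE _ 1 (Nat.zero_le _)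
      · have e : Vorbis.Globals.log2_4.beg = 0x120640 := rfl
        rw [e, UInt64.toNat_ofNat']
        omega
      · have e : Vorbis.Globals.log2_4.beg = 0x120640 := rfl
        rw [e, UInt64.toNat_ofNat']
        omega
    · apply hfr.same.step_same hs
      intro w hw a ha1 ha2
      have := hws w hw
      refine ⟨⟨g.RA - depth, g.RA⟩, List.mem_cons_self, ?_, ?_⟩
      · simp only [depth]
        omega
      · simp only []
        omega
  · rw [ech]
    exact hile
  · have e : stb_vorbis.previous_length s.mem g.f = stb_vorbis.previous_length v.mem g.f := by
      simp only [vacc, voff]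
      exact hos.i32 1256 (by decide)
    rw [e]
    exact h.prev0
  · apply h.chan.congr
    · intro j hj
      simp only [vacc, voff]
      rw [Nat.add_assoc]
      exact hos.u64 (872 + 8 * j) (InWins.of_mem (136, 1808) (by decide) (by simp only []; omega) (by simp only []; omega))
    · intro j hj
      simp only [vacc, voff]
      rw [Nat.add_assoc]
      exact hos.u64 (1128 + 8 * j) (InWins.of_mem (136, 1808) (by decide) (by simp only []; omega) (by simp only []; omega))
    · exact eb1
    · intro _ hB
      exact hB
  · rw [hE.i32 (g.R + 0x28) (by omega) (by omega) (Nat.le_refl _)]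
    apply h.fy.of_eq
    intro c hc
    simp only [vacc, voff]
    rw [Nat.add_assoc]
    exact hos.u64 (1264 + 8 * c) (InWins.of_mem (136, 1808) (by decide) (by simp only []; omega) (by simp only []; omega))

/-- `*f` lies inside ONE live object of the live set inside the function (own frame's objects included). -/
theorem obj_live {g : Ghost} {A : Arena × List Obj} (hh : g.Hand A) :
    LiveIn A.2 g.frames' g.f Off.sizeof.stb_vorbis := by
  obtain ⟨o, ho, h1, h2⟩ := hh.obj
  refine ⟨o, ?_, h1, h2⟩
  unfold Ghost.frames'
  rw [stackObjs_cons]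
  rcases List.mem_append.mp ho with k1 | k2
  · exact List.mem_append_left _ (List.mem_append_right _ k1)
  · exact List.mem_append_right _ k2

/-- The signed comparison `cmp [f+4], r14d ; jg` read as numbers: `r14d = i ≤ 16`, the dword `x`. -/
theorem lt_of_branch (i x : Nat) (hi : i ≤ 16) (hx : x < 2 ^ 32) :
    ((Word.part .w32 (addr i)).toInt < (BitVec.ofNat 32 x).toInt) ↔ (i : Int) < sint32 x := by
  have e1 : (Word.part .w32 (addr i)).toNat = i := by
    rw [Vorbis.toNat_part32, toNat_addr i (by omega)]
    omega
  have e2 : (Word.part .w32 (addr i)).toInt = (i : Int) := by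
    rw [Vorbis.Spec.toInt_of_lt _ (by omega), e1]
  have e3 : (BitVec.ofNat 32 x).toNat = x := by
    rw [BitVec.toNat_ofNat]
    omega
  rw [e2, BitVec.toInt_eq_toNat_cond, e3]
  unfold sint32
  split <;> split <;> omega

/-- **`Mid` OVER AN ALLOCATING CALLEE** (`init_blocksize`, `setup_malloc`): `Mid.frame` and `Mid.grow` in one step. `Mid.frame` asks
for the SAME ghost arena and an untouched shadow (`hsh`), `Mid.grow` for the SAME memory: neither applies to the return state of a
callee that allocates (new ghost arena, new shadow bytes, new memory). The environment, the arena layer and `Bits` are given for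
the new memory and the new ghost arena; everything else is carried as in `Mid.frame` (whose proof this is, but for the first line). -/
theorem mid_carry_alloc {g : Ghost} {k kc z : Nat} {Ac : Arena} {A A' : Arena × List Obj} {mem mem' : Mem}
    (h : Mid g k kc z Ac A mem) (hext : A.1.Extends A'.1)
    (he : ObjEq (Mid.winsAt k z) mem g.f mem' g.f) (hk : ∀ B, Ac.Blk B → B.Kept mem mem')
    (hconsts : SDFrameConsts kc mem' g.R) (hslot : 6 ≤ k → k ≤ 9 → mem'.i32 (g.R + 0x28) = mem.i32 (g.R + 0x28))
    (henv : Env (g.Blk A') (g.Live A') mem') (harena : ArenaOK A'.1 A'.2 mem' g.f) (hno : A'.1.temps = [])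
    (hbits : Bits (g.Blk A') g.len mem' g.f) : Mid g k kc z Ac A' mem' := by
  have hge := Mid.hi_ge k
  have m0 : ((0, 8) : Nat × Nat) ∈ Mid.winsAt k z := List.mem_cons_self
  have m1 : ((24, 48) : Nat × Nat) ∈ Mid.winsAt k z := List.mem_cons_of_mem _ List.mem_cons_self
  have m2 : ((152, Mid.hi k) : Nat × Nat) ∈ Mid.winsAt k z :=
    List.mem_cons_of_mem _ (List.mem_cons_of_mem _ List.mem_cons_self)
  have m3 : ((restFrom z, 1480) : Nat × Nat) ∈ Mid.winsAt k z :=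
    List.mem_cons_of_mem _ (List.mem_cons_of_mem _ (List.mem_cons_of_mem _ List.mem_cons_self))
  have m4 : ((1749, 1750) : Nat × Nat) ∈ Mid.winsAt k z :=
    List.mem_cons_of_mem _ (List.mem_cons_of_mem _ (List.mem_cons_of_mem _ (List.mem_cons_of_mem _ List.mem_cons_self)))
  have m5 : ((1784, 1788) : Nat × Nat) ∈ Mid.winsAt k z :=
    List.mem_cons_of_mem _ (List.mem_cons_of_mem _ (List.mem_cons_of_mem _ (List.mem_cons_of_mem _
      (List.mem_cons_of_mem _ List.mem_cons_self))))
  have hkc : ∀ B, Ac.Blk B → B.Kept mem mem' := hk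
  have heown : ObjEq (Own.winsAt k) mem g.f mem' g.f := by
    apply he.sub
    intro w hw
    simp only [Own.winsAt, List.mem_cons, List.mem_nil_iff, or_false] at hw
    rcases hw with rfl | rfl | rfl
    · exact ⟨(0, 8), m0, by simp only []; omega, by simp only []; omega⟩
    · exact ⟨(24, 48), m1, Nat.le_refl _, Nat.le_refl _⟩
    · exact ⟨(152, Mid.hi k), m2, by simp only []; omega, Nat.le_refl _⟩
  have hown := h.own.frame heown hkc
  refine ⟨henv, ?_, harena, hno, h.extc.trans hext, hbits, ?_, ?_, ?_, hown, ?_, ?_, ?_⟩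
  · exact hconsts
  · have e : stb_vorbis.first_decode mem' g.f = stb_vorbis.first_decode mem g.f := by
      simp only [vacc, voff]
      exact he.u8 1749 ⟨(1749, 1750), m4, Nat.le_refl _, Nat.le_refl _⟩
    rw [e]
    exact h.first
  · have e : stb_vorbis.discard_samples_deferred mem' g.f = stb_vorbis.discard_samples_deferred mem g.f := by
      simp only [vacc, voff]
      exact he.i32 1784 ⟨(1784, 1788), m5, Nat.le_refl _, Nat.le_refl _⟩
    rw [e]
    exact h.discard0
  · apply h.header.transfer
    apply he.sub
    intro w hw
    simp only [HeaderOK.wins, List.mem_cons, List.mem_nil_iff, or_false] at hw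
    rcases hw with rfl | rfl
    · exact ⟨(0, 8), m0, Nat.le_refl _, Nat.le_refl _⟩
    · exact ⟨(152, Mid.hi k), m2, Nat.le_refl _, by simp only []; omega⟩
  · -- the slot of longest_floorlist and `values` of every floor
    intro h6 h9
    obtain ⟨h1, h2, h3⟩ := h.lfl h6 h9
    have hb6 := Mid.hi_ge6 h6
    have hfl := h.own.floor h6
    have eslot : mem'.i32 (g.R + 0x28) = mem.i32 (g.R + 0x28) := hslot h6 h9
    have ecount : stb_vorbis.floor_count mem' g.f = stb_vorbis.floor_count mem g.f := by
      simp only [vacc, voff]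
      exact he.i32 176 ⟨(152, Mid.hi k), m2, by simp only []; omega, by simp only []; omega⟩
    have ecfg : stb_vorbis.floor_config mem' g.f = stb_vorbis.floor_config mem g.f := by
      simp only [vacc, voff]
      exact he.u64 312 ⟨(152, Mid.hi k), m2, by simp only []; omega, by simp only []; omega⟩
    have hkept := hkc _ hfl.FL2
    refine ⟨by rw [eslot]; exact h1, by rw [eslot]; exact h2, ?_⟩
    intro i hi
    rw [ecount] at hi
    have eat : stb_vorbis.floor_config_at mem' g.f i = stb_vorbis.floor_config_at mem g.f i := by
      simp only [stb_vorbis.floor_config_at]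
      rw [ecfg]
    have hcnt := hfl.FL1
    have ev : Floor1.values mem' (stb_vorbis.floor_config_at mem g.f i) = Floor1.values mem (stb_vorbis.floor_config_at mem g.f i) := by
      simp only [Floor1.values, stb_vorbis.floor_config_at, voff]
      apply hkept.i32
      · simp only [floorBlock, voff]
        omega
      · simp only [floorBlock, voff]
        omega
    rw [eat, ev, eslot]
    exact h3 i hi
  · intro h9
    have hb9 := Mid.hi_ge9 h9
    apply (h.mode h9).transfer
    apply he.sub
    intro w hw
    simp only [ModeOK.wins, List.mem_cons, List.mem_nil_iff, or_false] at hw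
    rcases hw with rfl | rfl
    · exact ⟨(152, Mid.hi k), m2, by simp only []; omega, by simp only []; omega⟩
    · exact ⟨(152, Mid.hi k), m2, by simp only []; omega, by simp only []; omega⟩
  · -- the zero rest
    intro o ho1 ho2
    have hz := h.rest o ho1 ho2
    simp only [voff] at ho2
    rw [he (restFrom z, 1480) m3 o ho1 ho2]
    exact hz

/-- `f->channels` as the walker reads it: the dword at `rdi₀ + 4` (`f` = the entry's rdi). -/
theorem channels_word (mem : Mem) (g : Ghost) :
    stb_vorbis.channels mem g.f = sint32 (mem.readLE (g.e.reg .rdi + 4) 4) := by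
  simp only [vacc, voff, Mem.i32, Mem.u32]
  rw [← addr_add_lit]
  unfold Ghost.f
  rw [addr_toNat]

/-- `f->channels` reads the same over stores below the steady stack pointer. -/
theorem channels_carry_stack {u₀ : State} {g : Ghost} {pc : Word} {i : Nat} {A9 : Arena} {A : Arena × List Obj} {v : State}
    {mem' : Mem} (h : ChanLoop u₀ g pc i A9 A v) {ws : List Span} (hs : Mem.SameExcept ws v.mem mem')
    (hws : ∀ w, w ∈ ws → g.RA - 1888 ≤ w.lo ∧ w.hi ≤ g.R) :
    stb_vorbis.channels mem' g.f = stb_vorbis.channels v.mem g.f := by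
  have hfr := h.frame
  obtain ⟨hR1, hR8⟩ := hfr.r_eq
  obtain ⟨_, hra1, hra2⟩ := hfr.ra
  simp only [depth, steady] at hR1 hra1
  obtain ⟨hf1, hf2, hf3⟩ := f_where hfr h.hand
  have hos : ObjSame g.f v.mem mem' := by
    apply ObjSame.of_sameExcept hs (by simp only [voff]; omega)
    intro w hw
    have := hws w hw
    omega
  simp only [vacc, voff]
  exact hos.i32 4 (by decide)

/-- **What a span of a store / of a callee's footprint may be in this segment**, as numbers: the stack below the steady stack
pointer; the spill slot `[R + 10H]` (max_part_read); the fields of `*f` that init_blocksize and the segment write (`setup_memory_required`, `setup_offset`, `error`,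
`blocksize[2]`, the ten table pointers); the arena's free part; the arena's shadow. -/
def Benign (g : Ghost) (A : Arena) (w : Span) : Prop :=
  (g.RA - 1888 ≤ w.lo ∧ w.hi ≤ g.R) ∨
  (g.R + 16 ≤ w.lo ∧ w.hi ≤ g.R + 20) ∨
  (g.f + 8 ≤ w.lo ∧ w.hi ≤ g.f + 12) ∨
  (g.f + 128 ≤ w.lo ∧ w.hi ≤ g.f + 132) ∨
  (g.f + 140 ≤ w.lo ∧ w.hi ≤ g.f + 152) ∨
  (g.f + 1400 ≤ w.lo ∧ w.hi ≤ g.f + 1480) ∨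
  (A.B + A.S ≤ w.lo ∧ w.hi ≤ A.B + A.L) ∨
  (0xC00000 + A.B / 8 ≤ w.lo ∧ w.hi ≤ 0xC00000 + (A.B + A.L + 7) / 8)

/-- **The state-independent part of the assertions between the channel loop's exit and R17** (SD.10 … SD.11): `Frame` without
rip / rsp / the ABI flags, the hand-over carrier, `Mid g 9 9 11` (the zero rest is gone: the table pointers are being assigned),
M7, and M6 / FY1 in their loop form for `i = channels`, over the blocks allocated between the snapshots `A9` and `A10` (`A10` = the
arena at the loop's exit). -/
structure Carried (u₀ : State) (g : Ghost) (A9 A10 : Arena) (A : Arena × List Obj) (i : Nat) (mem : Mem) : Prop where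
  entry : AtEntry (conv u₀) L.start_decoder.entry depth g.ret g.e
  shadowIdx : mem.u64 (g.R + 8) = (g.R + 0x50) / 8
  saved_rbx : mem.u64 (g.R + 0x598) = (g.e.reg .rbx).toNat
  saved_rbp : mem.u64 (g.R + 0x5a0) = (g.e.reg .rbp).toNat
  saved_r12 : mem.u64 (g.R + 0x5a8) = (g.e.reg .r12).toNat
  saved_r13 : mem.u64 (g.R + 0x5b0) = (g.e.reg .r13).toNat
  saved_r14 : mem.u64 (g.R + 0x5b8) = (g.e.reg .r14).toNat
  saved_r15 : mem.u64 (g.R + 0x5c0) = (g.e.reg .r15).toNat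
  saved_ra : mem.u64 (g.R + 0x5c8) = g.ret.toNat
  code : CodeOK u₀ mem
  shadow : ShadowInv A.2 g.frames' g.R mem
  offText : ∀ o, o ∈ A.2 → L.textHi ≤ o.base
  ext : g.A0.1.Extends A.1
  callers : ∀ bF, bF ∈ g.frames → g.RA + 8 ≤ bF.1
  sh7 : Log2_4In mem
  same : Mem.SameExcept (footprint g) g.e.mem mem
  hand : g.Hand A
  mid : Mid g 9 9 11 A9 A mem
  prev0 : stb_vorbis.previous_length mem g.f = 0
  ext9 : A9.Extends A10
  ext10 : A10.Extends A.1
  i_eq : stb_vorbis.channels mem g.f = (i : Int)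
  chan : Mdct.ChanUpTo (Since A9 A10) mem g.f i
  fy : FYUpTo (Since A9 A10) mem g.f (mem.i32 (g.R + 0x28)) i

/-- The `Frame` of a cut point from the state-independent part and the state's registers. -/
theorem Carried.frame {u₀ : State} {g : Ghost} {A9 A10 : Arena} {A : Arena × List Obj} {i : Nat} {s : State} {pc : Word}
    (h : Carried u₀ g A9 A10 A i s.mem) (hrip : s.rip = pc) (hrsp : s.reg .rsp = addr g.R) (hinv : abiInv s) :
    Frame u₀ g pc A s :=
  ⟨h.entry, hrip, hrsp, h.shadowIdx, h.saved_rbx, h.saved_rbp, h.saved_r12, h.saved_r13, h.saved_r14, h.saved_r15, h.saved_ra,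
    h.code, hinv, h.shadow, h.offText, h.ext, h.callers, h.sh7, h.same⟩

/-- **The channel loop's exit** (`¬ i < channels`, with `i ≤ channels`): the state-independent part, `A10` = the current arena. -/
theorem core_of_chan {u₀ : State} {g : Ghost} {pc : Word} {i : Nat} {A9 : Arena} {A : Arena × List Obj} {v : State}
    (h : ChanLoop u₀ g pc i A9 A v) (hge : stb_vorbis.channels v.mem g.f ≤ (i : Int)) : Carried u₀ g A9 A.1 A i v.mem := by
  have hfr := h.frame
  have hm := h.mid
  have hile := h.i_le
  refine ⟨hfr.entry, hfr.shadowIdx, hfr.saved_rbx, hfr.saved_rbp, hfr.saved_r12, hfr.saved_r13, hfr.saved_r14, hfr.saved_r15,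
    hfr.saved_ra, hfr.code, hfr.shadow, hfr.offText, hfr.ext, hfr.callers, hfr.sh7, hfr.same, h.hand, ?_, h.prev0, hm.extc,
    Arena.Extends.refl _, by omega, h.chan, h.fy⟩
  refine ⟨hm.env, hm.consts, hm.arena, hm.noTemps, hm.extc, hm.bits, hm.first, hm.discard0, hm.header, hm.own, hm.lfl, hm.mode, ?_⟩
  intro o ho1 ho2
  have e : restFrom 11 = 1480 := by decide
  rw [e] at ho1
  simp only [voff] at ho2
  omega

/-- **What a batch of `Benign` spans leaves alone**: every window of `*f` off the written fields, every block of the arena, the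
frame's slots `[R, RA + 8)`. (The pieces of `core_carry`, for the facts a segment carries besides `Carried`: the tables of the
first init_blocksize over the second.) -/
theorem core_keep {u₀ : State} {g : Ghost} {A9 A10 : Arena} {A : Arena × List Obj} {i : Nat} {mem mem' : Mem}
    (h : Carried u₀ g A9 A10 A i mem) {ws : List Span} (hs : Mem.SameExcept ws mem mem')
    (hws : ∀ w, w ∈ ws → Benign g A.1 w) :
    (∀ ws' : Wins, (∀ w, w ∈ ws' → w.2 ≤ 8 ∨ (12 ≤ w.1 ∧ w.2 ≤ 128) ∨ (132 ≤ w.1 ∧ w.2 ≤ 140) ∨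
      (152 ≤ w.1 ∧ w.2 ≤ 1400) ∨ (1480 ≤ w.1 ∧ w.2 ≤ 1808)) → ObjEq ws' mem g.f mem' g.f) ∧
    AllKept A.1.Blk mem mem' ∧ Mem.EqOn (g.R + 20) (g.RA + 8) mem mem' := by
  have hm := h.mid
  obtain ⟨hf1, hf2, hf3⟩ := f_where' h.shadow h.offText h.callers h.hand
  have hra1 : 0x700000 + 1888 ≤ g.RA := h.entry.room
  have hra2 : g.RA + 8 ≤ 0x800000 := h.entry.top
  have hra8 : g.RA % 8 = 0 := h.entry.align
  have hR1 : g.R + 1480 = g.RA := by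
    unfold Ghost.R
    simp only [steady]
    omega
  have ha := hm.arena
  obtain ⟨_, _, _, hAR1⟩ := ha.AR1
  obtain ⟨hx1, hx2⟩ := ha.AR1x
  obtain ⟨hS, hT, _, _⟩ := ha.AR2
  have hat : 0x119d40 ≤ A.1.B := h.hand.arenaText
  have hout := h.hand.objOut
  simp only [voff] at hout
  have hlog : (0x120640 : Nat) + 16 ≤ A.1.B ∨ A.1.B + A.1.L ≤ 0x120640 :=
    h.hand.outside ⟨0x120640, 16⟩ (by simp only [fixedBlocks, globalBlocks, List.mem_cons, true_or, or_true])
  have hflog : g.f + 1808 ≤ 0x120640 ∨ 0x120640 + 16 ≤ g.f := by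
    have hok := hm.env.ok
    have hb1 : g.Blk A (objBlock g.f) := hm.bits.OB1
    have hb2 : g.Blk A ⟨0x120640, 16⟩ :=
      runBlk_extra (List.mem_cons_of_mem _ (by simp only [fixedBlocks, globalBlocks, List.mem_cons, true_or, or_true]))
    rcases hok.apart _ _ hb1 hb2 with e | hd
    · have := congrArg Block.size e
      simp only [vblock, voff] at this
      omega
    · simp only [vblock, voff] at hd
      omega
  -- the general "off every span" fact, for a region given by its bounds
  have hEq : ∀ lo hi : Nat, hi ≤ 0xC00000 →
      ((g.R ≤ lo ∧ hi ≤ g.R + 16) ∨ (g.R + 20 ≤ lo ∧ hi ≤ g.RA + 8) ∨ hi ≤ 0x119d40 ∨ (0x120640 ≤ lo ∧ hi ≤ 0x120650) ∨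
        (g.f ≤ lo ∧ hi ≤ g.f + 8) ∨ (g.f + 12 ≤ lo ∧ hi ≤ g.f + 128) ∨ (g.f + 132 ≤ lo ∧ hi ≤ g.f + 140) ∨
        (g.f + 152 ≤ lo ∧ hi ≤ g.f + 1400) ∨ (g.f + 1480 ≤ lo ∧ hi ≤ g.f + 1808)) → Mem.EqOn lo hi mem mem' := by
    intro lo hi hhi hreg
    apply hs.eqOn
    intro w hw
    have hb := hws w hw
    unfold Benign at hb
    omega
  have hE1a : Mem.EqOn g.R (g.R + 16) mem mem' := hEq _ _ (by omega) (Or.inl ⟨Nat.le_refl _, Nat.le_refl _⟩)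
  have hE1 : Mem.EqOn (g.R + 20) (g.RA + 8) mem mem' :=
    hEq _ _ (by omega) (Or.inr (Or.inl ⟨Nat.le_refl _, Nat.le_refl _⟩))
  have hbig : g.RA + 8 ≤ 2 ^ 64 := by omega
  have hfb : g.f + Off.sizeof.stb_vorbis ≤ 2 ^ 64 := by
    simp only [voff]
    omega
  -- the windows of `*f` off the benign fields
  have hobjeq : ∀ ws' : Wins, (∀ w, w ∈ ws' → w.2 ≤ 8 ∨ (12 ≤ w.1 ∧ w.2 ≤ 128) ∨ (132 ≤ w.1 ∧ w.2 ≤ 140) ∨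
      (152 ≤ w.1 ∧ w.2 ≤ 1400) ∨ (1480 ≤ w.1 ∧ w.2 ≤ 1808)) → ObjEq ws' mem g.f mem' g.f := by
    intro ws' hws'
    apply ObjEq.of_sameExcept hs
    · intro w hw
      have := hws' w hw
      omega
    · intro w hw sp hsp
      have h1 := hws' w hw
      have hb := hws sp hsp
      unfold Benign at hb
      omega
  -- every block of the arena is kept
  have hkept : AllKept A.1.Blk mem mem' := by
    apply AllKept.of_sameExcept ha.blkOK hs
    intro B hB w hw
    have hb := hws w hw
    unfold Benign at hb
    have hin := arena_inside ha hB
    have hr := ha.block_range (p := B.base) (n := B.size) hB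
    have hl := le_r8 B.size
    have hst := ha.blk_off_stack hB
    omega
  exact ⟨hobjeq, hkept, hE1⟩

/-- **THE CARRY LEMMA OF THE SEGMENT**: the state-independent part over a batch of stores / a callee's footprint whose spans are
all `Benign`, possibly with a grown ghost arena (`A → A'`: init_blocksize); the shadow layer and the arena layer are given for
the new memory (the callee's post, or `ShadowInv.untouched` / `ArenaOK.frame`). -/
theorem core_carry {u₀ : State} {g : Ghost} {A9 A10 : Arena} {A A' : Arena × List Obj} {i : Nat} {mem mem' : Mem}
    (h : Carried u₀ g A9 A10 A i mem) (hext : A.1.Extends A'.1) {ws : List Span} (hs : Mem.SameExcept ws mem mem')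
    (hws : ∀ w, w ∈ ws → Benign g A.1 w)
    (hshadow : ShadowInv A'.2 g.frames' g.R mem') (hoff : ∀ o, o ∈ A'.2 → L.textHi ≤ o.base)
    (hsub : ∀ o, o ∈ A.2 → o ∈ A'.2) (harena : ArenaOK A'.1 A'.2 mem' g.f) (hno : A'.1.temps = []) :
    Carried u₀ g A9 A10 A' i mem' := by
  have hm := h.mid
  obtain ⟨hf1, hf2, hf3⟩ := f_where' h.shadow h.offText h.callers h.hand
  have hra1 : 0x700000 + 1888 ≤ g.RA := h.entry.room
  have hra2 : g.RA + 8 ≤ 0x800000 := h.entry.top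
  have hra8 : g.RA % 8 = 0 := h.entry.align
  have hR1 : g.R + 1480 = g.RA := by
    unfold Ghost.R
    simp only [steady]
    omega
  have ha := hm.arena
  obtain ⟨_, _, _, hAR1⟩ := ha.AR1
  obtain ⟨hx1, hx2⟩ := ha.AR1x
  obtain ⟨hS, hT, _, _⟩ := ha.AR2
  have hat : 0x119d40 ≤ A.1.B := h.hand.arenaText
  have hout := h.hand.objOut
  simp only [voff] at hout
  have hlog : (0x120640 : Nat) + 16 ≤ A.1.B ∨ A.1.B + A.1.L ≤ 0x120640 :=
    h.hand.outside ⟨0x120640, 16⟩ (by simp only [fixedBlocks, globalBlocks, List.mem_cons, true_or, or_true])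
  have hflog : g.f + 1808 ≤ 0x120640 ∨ 0x120640 + 16 ≤ g.f := by
    have hok := hm.env.ok
    have hb1 : g.Blk A (objBlock g.f) := hm.bits.OB1
    have hb2 : g.Blk A ⟨0x120640, 16⟩ :=
      runBlk_extra (List.mem_cons_of_mem _ (by simp only [fixedBlocks, globalBlocks, List.mem_cons, true_or, or_true]))
    rcases hok.apart _ _ hb1 hb2 with e | hd
    · have := congrArg Block.size e
      simp only [vblock, voff] at this
      omega
    · simp only [vblock, voff] at hd
      omega
  -- the general "off every span" fact, for a region given by its bounds
  have hEq : ∀ lo hi : Nat, hi ≤ 0xC00000 →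
      ((g.R ≤ lo ∧ hi ≤ g.R + 16) ∨ (g.R + 20 ≤ lo ∧ hi ≤ g.RA + 8) ∨ hi ≤ 0x119d40 ∨ (0x120640 ≤ lo ∧ hi ≤ 0x120650) ∨
        (g.f ≤ lo ∧ hi ≤ g.f + 8) ∨ (g.f + 12 ≤ lo ∧ hi ≤ g.f + 128) ∨ (g.f + 132 ≤ lo ∧ hi ≤ g.f + 140) ∨
        (g.f + 152 ≤ lo ∧ hi ≤ g.f + 1400) ∨ (g.f + 1480 ≤ lo ∧ hi ≤ g.f + 1808)) → Mem.EqOn lo hi mem mem' := by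
    intro lo hi hhi hreg
    apply hs.eqOn
    intro w hw
    have hb := hws w hw
    unfold Benign at hb
    omega
  have hE1a : Mem.EqOn g.R (g.R + 16) mem mem' := hEq _ _ (by omega) (Or.inl ⟨Nat.le_refl _, Nat.le_refl _⟩)
  have hE1 : Mem.EqOn (g.R + 20) (g.RA + 8) mem mem' :=
    hEq _ _ (by omega) (Or.inr (Or.inl ⟨Nat.le_refl _, Nat.le_refl _⟩))
  have hbig : g.RA + 8 ≤ 2 ^ 64 := by omega
  have hfb : g.f + Off.sizeof.stb_vorbis ≤ 2 ^ 64 := by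
    simp only [voff]
    omega
  -- the windows of `*f` off the benign fields
  have hobjeq : ∀ ws' : Wins, (∀ w, w ∈ ws' → w.2 ≤ 8 ∨ (12 ≤ w.1 ∧ w.2 ≤ 128) ∨ (132 ≤ w.1 ∧ w.2 ≤ 140) ∨
      (152 ≤ w.1 ∧ w.2 ≤ 1400) ∨ (1480 ≤ w.1 ∧ w.2 ≤ 1808)) → ObjEq ws' mem g.f mem' g.f := by
    intro ws' hws'
    apply ObjEq.of_sameExcept hs
    · intro w hw
      have := hws' w hw
      omega
    · intro w hw sp hsp
      have h1 := hws' w hw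
      have hb := hws sp hsp
      unfold Benign at hb
      omega
  -- every block of the arena is kept
  have hkept : AllKept A.1.Blk mem mem' := by
    apply AllKept.of_sameExcept ha.blkOK hs
    intro B hB w hw
    have hb := hws w hw
    unfold Benign at hb
    have hin := arena_inside ha hB
    have hr := ha.block_range (p := B.base) (n := B.size) hB
    have hl := le_r8 B.size
    have hst := ha.blk_off_stack hB
    omega
  have hk9 : ∀ B, A9.Blk B → B.Kept mem mem' := fun B hB => hkept B (hB.mono hm.extc)
  -- the environment of the new arena / live list
  have hextra : BlkOK (listBlk g.extra) :=
    ⟨fun B hB => hm.env.ok.inside B (Or.inr hB), fun B C hB hC => hm.env.ok.apart B C (Or.inr hB) (Or.inr hC)⟩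
  have houtside : ∀ C, C ∈ g.extra → C.base + C.size ≤ A'.1.B ∨ A'.1.B + A'.1.L ≤ C.base := by
    intro C hC
    rw [hext.B, hext.L]
    rcases List.mem_cons.mp hC with rfl | hmem
    · simp only [vblock, voff]
      exact hout
    · exact h.hand.outside C hmem
  have hmonoL : ∀ x, g.Live A x → g.Live A' x := by
    intro x hx
    have hx' : Asan.Live (stackObjs g.frames' ++ A.2) x := hx
    obtain ⟨o, ho, hbx⟩ := hx'
    show Asan.Live (stackObjs g.frames' ++ A'.2) x
    refine ⟨o, ?_, hbx⟩
    rcases List.mem_append.mp ho with k1 | k2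
    · exact List.mem_append_left _ k1
    · exact List.mem_append_right _ (hsub o k2)
  have hlx : BlkLive (listBlk g.extra) (g.Live A') :=
    BlkLive.mono (BlkLive.sub hm.env.live (fun B hB => Or.inr hB)) hmonoL
  have hlive : BlkLive (g.Blk A') (g.Live A') :=
    harena.runBlk_live (fun o ho => List.mem_append_right _ ho) hlx
  have henv : Env (g.Blk A') (g.Live A') mem' := ⟨hshadow.shadow.covers, harena.runBlk_ok hextra houtside, hlive⟩
  have hup : ∀ B, g.Blk A B → g.Blk A' B := runBlk_mono hext (fun _ hB => hB)
  have hbits : Bits (g.Blk A') g.len mem' g.f := by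
    apply hm.bits.transfer (hobjeq _ ?_) ⟨hup _ hm.bits.OB1, hm.bits.OB1a⟩ hm.bits.OBR (hup _ hm.bits.S2)
    intro w hw
    simp only [Bits.wins, List.mem_cons, List.mem_nil_iff, or_false] at hw
    rcases hw with rfl | rfl | rfl | rfl <;> simp only [] <;> omega
  have hwins : Mid.winsAt 9 11 = [(0, 8), (24, 48), (152, 868), (1480, 1480), (1749, 1750), (1784, 1788)] := by
    decide
  have hmid : Mid g 9 9 11 A9 A' mem' := by
    apply mid_carry_alloc hm hext _ hk9 _ _ henv harena hno hbits
    · apply hobjeq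
      intro w hw
      rw [hwins] at hw
      simp only [List.mem_cons, List.mem_nil_iff, or_false] at hw
      rcases hw with rfl | rfl | rfl | rfl | rfl | rfl <;> simp only [] <;> omega
    · obtain ⟨c1, c2, c3, _, c5⟩ := hm.consts
      refine ⟨c1, ?_, ?_, fun h7 => absurd h7 (by omega), ?_⟩
      · rw [hE1a.u64 (g.R + 8) (by omega) (by omega) (by omega)]
        exact c2
      · rw [hE1.u32 (g.R + 0x20) (by omega) (by omega) hbig]
        exact c3
      · intro k1 k2
        rw [hE1.u32 (g.R + 0x24) (by omega) (by omega) hbig]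
        exact c5 k1 k2
    · intro _ _
      exact hE1.i32 (g.R + 0x28) (by omega) (by omega) hbig
  have hfields : ObjEq [(4, 8), (152, 160), (872, 1000), (1128, 1392)] mem g.f mem' g.f := by
    apply hobjeq
    intro w hw
    simp only [List.mem_cons, List.mem_nil_iff, or_false] at hw
    rcases hw with rfl | rfl | rfl | rfl <;> simp only [] <;> omega
  have ech : stb_vorbis.channels mem' g.f = stb_vorbis.channels mem g.f := by
    simp only [vacc, voff]
    exact hfields.i32 4 (by decide)
  have eb1 : stb_vorbis.blocksize_1 mem' g.f = stb_vorbis.blocksize_1 mem g.f := by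
    simp only [vacc, voff]
    exact hfields.i32 156 (by decide)
  have h16 := hm.header.HD1.2
  have hieq := h.i_eq
  refine ⟨h.entry, ?_, ?_, ?_, ?_, ?_, ?_, ?_, ?_, ?_, hshadow, hoff, h.ext.trans hext, h.callers, ?_, ?_,
    HandOK.mono h.hand hext hsub, hmid, ?_, h.ext9, h.ext10.trans hext, ?_, ?_, ?_⟩
  · rw [hE1a.u64 (g.R + 8) (by omega) (by omega) (by omega)]
    exact h.shadowIdx
  · rw [hE1.u64 (g.R + 0x598) (by omega) (by omega) hbig]
    exact h.saved_rbx
  · rw [hE1.u64 (g.R + 0x5a0) (by omega) (by omega) hbig]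
    exact h.saved_rbp
  · rw [hE1.u64 (g.R + 0x5a8) (by omega) (by omega) hbig]
    exact h.saved_r12
  · rw [hE1.u64 (g.R + 0x5b0) (by omega) (by omega) hbig]
    exact h.saved_r13
  · rw [hE1.u64 (g.R + 0x5b8) (by omega) (by omega) hbig]
    exact h.saved_r14
  · rw [hE1.u64 (g.R + 0x5c0) (by omega) (by omega) hbig]
    exact h.saved_r15
  · rw [hE1.u64 (g.R + 0x5c8) (by omega) (by omega) hbig]
    exact h.saved_ra
  · show Mem.EqOn L.textLo L.textHi u₀.mem mem'
    have hc : Mem.EqOn L.textLo L.textHi u₀.mem mem := h.code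
    apply hc.trans
    have e : L.textHi = 0x119d40 := rfl
    rw [e]
    exact hEq _ _ (by omega) (Or.inr (Or.inr (Or.inl (Nat.le_refl _))))
  · intro j hj
    have h0 := h.sh7 j hj
    rw [← h0]
    have hE3 : Mem.EqOn 0x120640 0x120650 mem mem' :=
      hEq _ _ (by omega) (Or.inr (Or.inr (Or.inr (Or.inl ⟨Nat.le_refl _, Nat.le_refl _⟩))))
    have e : Vorbis.Globals.log2_4.beg = 0x120640 := rfl
    apply hE3.readLE _ 1
    · rw [e, UInt64.toNat_ofNat']
      omega
    · rw [e, UInt64.toNat_ofNat']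
      omega
    · rw [e, UInt64.toNat_ofNat']
      omega
  · -- the function's footprint
    have hB0 : A.1.B = g.A0.1.B := h.ext.B
    have hL0 : A.1.L = g.A0.1.L := h.ext.L
    apply h.same.step_same hs
    intro w hw a ha1 ha2
    have hb := hws w hw
    unfold Benign at hb
    have hRAe : g.RA = (g.e.reg .rsp).toNat := rfl
    have hfe : g.f = (g.e.reg .rdi).toNat := rfl
    simp only [footprint, writes, List.mem_cons, List.mem_nil_iff, or_false, exists_eq_or_imp, exists_eq_left, shadowSpan,
      vblock, voff, depth]
    rw [← hRAe, ← hfe, ← hB0, ← hL0]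
    omega
  · have e : stb_vorbis.previous_length mem' g.f = stb_vorbis.previous_length mem g.f := by
      simp only [vacc, voff]
      exact hfields.i32 1256 (InWins.of_mem (1128, 1392) (by decide) (by decide) (by decide))
    rw [e]
    exact h.prev0
  · rw [ech]
    exact hieq
  · apply h.chan.congr
    · intro j hj
      simp only [vacc, voff]
      rw [Nat.add_assoc]
      exact hfields.u64 (872 + 8 * j) (InWins.of_mem (872, 1000) (by decide) (by simp only []; omega) (by simp only []; omega))
    · intro j hj
      simp only [vacc, voff]
      rw [Nat.add_assoc]
      exact hfields.u64 (1128 + 8 * j) (InWins.of_mem (1128, 1392) (by decide) (by simp only []; omega) (by simp only []; omega))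
    · exact eb1
    · intro _ hB
      exact hB
  · rw [hE1.i32 (g.R + 0x28) (by omega) (by omega) hbig]
    apply h.fy.of_eq
    intro c hc
    simp only [vacc, voff]
    rw [Nat.add_assoc]
    exact hfields.u64 (1264 + 8 * c) (InWins.of_mem (1128, 1392) (by decide) (by simp only []; omega) (by simp only []; omega))

/-- `core_carry` for the segment's own stores (same ghost arena): pushes of return addresses below the steady stack pointer and
stores into `f->error … f->blocksize[1]` leave the shadow and the arena's four fields alone. -/
theorem core_carry_plain {u₀ : State} {g : Ghost} {A9 A10 : Arena} {A : Arena × List Obj} {i : Nat} {mem mem' : Mem}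
    (h : Carried u₀ g A9 A10 A i mem) {ws : List Span} (hs : Mem.SameExcept ws mem mem')
    (hws : ∀ w, w ∈ ws → (g.RA - 1888 ≤ w.lo ∧ w.hi ≤ g.R) ∨ (g.f + 140 ≤ w.lo ∧ w.hi ≤ g.f + 152) ∨
      (g.R + 16 ≤ w.lo ∧ w.hi ≤ g.R + 20)) :
    Carried u₀ g A9 A10 A i mem' := by
  have hben : ∀ w, w ∈ ws → Benign g A.1 w := by
    intro w hw
    unfold Benign
    rcases hws w hw with h1 | h1 | h1
    · exact Or.inl h1
    · exact Or.inr (Or.inr (Or.inr (Or.inr (Or.inl h1))))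
    · exact Or.inr (Or.inl h1)
  obtain ⟨hobjeq, _, hE1⟩ := core_keep h hs hben
  obtain ⟨hf1, hf2, hf3⟩ := f_where' h.shadow h.offText h.callers h.hand
  have hra1 : 0x700000 + 1888 ≤ g.RA := h.entry.room
  have hra2 : g.RA + 8 ≤ 0x800000 := h.entry.top
  have hR1 : g.R + 1480 = g.RA := by
    unfold Ghost.R
    simp only [steady]
    omega
  have hsh : Mem.EqOn 0xC00000 0xE00000 mem mem' := by
    apply hs.eqOn
    intro w hw
    have := hws w hw
    omega
  apply core_carry h (Arena.Extends.refl _) hs hben (h.shadow.untouched hsh) h.offText (fun _ ho => ho) _ h.mid.noTemps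
  apply h.mid.arena.frame (by simp only [voff]; omega)
  apply hs.eqOn
  intro w hw
  have := hws w hw
  simp only [voff]
  omega

/-- `f->blocksize_0` as the walker reads it: the dword at `rdi₀ + 152` IS the number `bsize mem f 0` (HD3: it is positive). -/
theorem bsize0_word (mem : Mem) (g : Ghost) (hd : Mdct.HD3 mem g.f) :
    mem.readLE (g.e.reg .rdi + 152) 4 = bsize mem g.f 0 := by
  have hfacts := hd.b0.facts
  rw [bsize_zero] at hfacts ⊢
  simp only [vacc, voff, Mem.i32, Mem.u32] at hfacts ⊢
  rw [← addr_add_lit] at hfacts ⊢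
  unfold Ghost.f at hfacts ⊢
  rw [addr_toNat] at hfacts ⊢
  have hlt : mem.readLE (g.e.reg .rdi + 152) 4 < 2 ^ 32 := Nat.lt_of_lt_of_le (Mem.readLE_lt' _ _ 4) (by decide)
  rcases sint32_cases (mem.readLE (g.e.reg .rdi + 152) 4) with ⟨_, h2⟩ | ⟨_, h2⟩
  · rw [h2, Int.toNat_natCast]
  · rw [h2] at hfacts
    omega

/-- `f->blocksize_1` as the walker reads it: the dword at `rdi₀ + 156` IS the number `bsize mem f 1`. -/
theorem bsize1_word (mem : Mem) (g : Ghost) (hd : Mdct.HD3 mem g.f) :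
    mem.readLE (g.e.reg .rdi + 156) 4 = bsize mem g.f 1 := by
  have hfacts := hd.b1.facts
  rw [bsize_one] at hfacts ⊢
  simp only [vacc, voff, Mem.i32, Mem.u32] at hfacts ⊢
  rw [← addr_add_lit] at hfacts ⊢
  unfold Ghost.f at hfacts ⊢
  rw [addr_toNat] at hfacts ⊢
  have hlt : mem.readLE (g.e.reg .rdi + 156) 4 < 2 ^ 32 := Nat.lt_of_lt_of_le (Mem.readLE_lt' _ _ 4) (by decide)
  rcases sint32_cases (mem.readLE (g.e.reg .rdi + 156) 4) with ⟨_, h2⟩ | ⟨_, h2⟩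
  · rw [h2, Int.toNat_natCast]
  · rw [h2] at hfacts
    omega

/-- M3 + M4 for ONE index `b`, over the blocks allocated since the snapshot `A10`: what one `init_blocksize` establishes. -/
def Tabs (A10 A : Arena) (mem : Mem) (f b : Nat) : Prop :=
  Mdct.Tables (Since A10 A) mem f b (bsize mem f b) ∧
    Mdct.RevOK mem (stb_vorbis.bit_reverse mem f b) (bsize mem f b)

/-- **The tables of index `b` over a batch of `Benign` spans that miss the five pointer slots of index `b`** (the other
`init_blocksize`, the stores of `blocksize[]`, pushes): the pointers and the block sizes read the same, the bit-reverse table's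
block is kept. -/
theorem tabs_keep {u₀ : State} {g : Ghost} {A9 A10 : Arena} {A : Arena × List Obj} {i : Nat} {mem mem' : Mem} {b : Nat}
    (h : Carried u₀ g A9 A10 A i mem) (ht : Tabs A10 A.1 mem g.f b) (hb : b < 2) {ws : List Span}
    (hs : Mem.SameExcept ws mem mem') (hws : ∀ w, w ∈ ws → Benign g A.1 w)
    (hoff : ∀ w, w ∈ ws → w.hi ≤ g.f + 1400 ∨ g.f + 1480 ≤ w.lo ∨
      ((w.hi ≤ g.f + 1400 + 8 * b ∨ g.f + 1408 + 8 * b ≤ w.lo) ∧ (w.hi ≤ g.f + 1416 + 8 * b ∨ g.f + 1424 + 8 * b ≤ w.lo) ∧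
        (w.hi ≤ g.f + 1432 + 8 * b ∨ g.f + 1440 + 8 * b ≤ w.lo) ∧ (w.hi ≤ g.f + 1448 + 8 * b ∨ g.f + 1456 + 8 * b ≤ w.lo) ∧
        (w.hi ≤ g.f + 1464 + 8 * b ∨ g.f + 1472 + 8 * b ≤ w.lo)))
    {A' : Arena} (hext : A.1.Extends A') : Tabs A10 A' mem' g.f b := by
  obtain ⟨hobjeq, hkept, _⟩ := core_keep h hs hws
  obtain ⟨hf1, hf2, hf3⟩ := f_where' h.shadow h.offText h.callers h.hand
  have hsz : ObjEq [(152, 160)] mem g.f mem' g.f := by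
    apply hobjeq
    intro w hw
    simp only [List.mem_cons, List.mem_nil_iff, or_false] at hw
    subst hw
    simp only []
    omega
  have e0 : stb_vorbis.blocksize_0 mem' g.f = stb_vorbis.blocksize_0 mem g.f := by
    simp only [vacc, voff]
    exact hsz.i32 152 (by decide)
  have e1 : stb_vorbis.blocksize_1 mem' g.f = stb_vorbis.blocksize_1 mem g.f := by
    simp only [vacc, voff]
    exact hsz.i32 156 (by decide)
  have eb : bsize mem' g.f b = bsize mem g.f b := bsize_congr e0 e1 b
  have hptr : ∀ k : Nat, (k = 1400 ∨ k = 1416 ∨ k = 1432 ∨ k = 1448 ∨ k = 1464) →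
      mem'.ptr (g.f + k + 8 * b) = mem.ptr (g.f + k + 8 * b) := by
    intro k hk
    have hE : Mem.EqOn (g.f + k + 8 * b) (g.f + k + 8 * b + 8) mem mem' := by
      apply hs.eqOn
      intro w hw
      have := hoff w hw
      omega
    exact hE.ptr _ (Nat.le_refl _) (Nat.le_refl _) (by omega)
  obtain ⟨htab, hrev⟩ := ht
  have eR : stb_vorbis.bit_reverse mem' g.f b = stb_vorbis.bit_reverse mem g.f b := by
    simp only [vacc, voff]
    exact hptr 1464 (by omega)
  refine ⟨?_, ?_⟩
  · rw [eb]
    apply htab.congr _ _ _ _ eR (fun B hB => hB.mono hext)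
    · simp only [vacc, voff]
      exact hptr 1400 (by omega)
    · simp only [vacc, voff]
      exact hptr 1416 (by omega)
    · simp only [vacc, voff]
      exact hptr 1432 (by omega)
    · simp only [vacc, voff]
      exact hptr 1448 (by omega)
  · rw [eb, eR]
    exact hrev.frame (hkept _ htab.bit_reverse.1)

/-- **The state-independent part after `init_blocksize(f, b, blocksize_b)` returned**: from `Carried` at the callee's entry memory
`m`, the callee's footprint (`hs`: the literal list of `init_blocksize.spec_writes` with the stack window in front; `fN`, `bN`,
`rN` = the callee's rdi, esi, rsp as numbers) and its post (the grown ghost arena `A'`, the longer object list `others'`, the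
arena layer and the shadow layer for them). The tables of the indices below `b` (the first call's, at the second call) are
carried along; the block sizes read the same. -/
theorem core_after_ib {u₀ : State} {g : Ghost} {A9 A10 : Arena} {A : Arena × List Obj} {i : Nat} {m m' : Mem}
    (h : Carried u₀ g A9 A10 A i m) {fN bN rN : Nat} (hfN : fN = g.f) (hbN : bN < 2) (hrN : rN + 8 = g.R)
    (hs : Mem.SameExcept
      [⟨rN - 256, rN⟩, ⟨fN + 8, fN + 12⟩, ⟨fN + 128, fN + 132⟩, ⟨fN + 140, fN + 144⟩,
        ⟨fN + 1400 + 8 * bN, fN + 1408 + 8 * bN⟩, ⟨fN + 1416 + 8 * bN, fN + 1424 + 8 * bN⟩,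
        ⟨fN + 1432 + 8 * bN, fN + 1440 + 8 * bN⟩, ⟨fN + 1448 + 8 * bN, fN + 1456 + 8 * bN⟩,
        ⟨fN + 1464 + 8 * bN, fN + 1472 + 8 * bN⟩, ⟨A.1.B + A.1.S, A.1.B + A.1.T⟩,
        shadowSpan (A.1.B + A.1.S) (A.1.B + A.1.T)] m m')
    {A' : Arena} {others' : List Obj} (hext : A.1.Extends A') (htemps : A'.temps = A.1.temps)
    (harena : ArenaOK A' others' m' g.f) (hshadow : ShadowInv others' g.frames' g.R m')
    (hsub : ∀ o, o ∈ A.2 → o ∈ others') (hsup : ∀ o, o ∈ others' → o ∈ A.2 ∨ o ∈ A'.setupObjs)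
    (hold : ∀ b', b' < bN → Tabs A10 A.1 m g.f b') :
    Carried u₀ g A9 A10 (A', others') i m' ∧ (∀ b', b' < bN → Tabs A10 A' m' g.f b') ∧
      (∀ c, bsize m' g.f c = bsize m g.f c) := by
  subst hfN
  have hra1 : 0x700000 + 1888 ≤ g.RA := h.entry.room
  have hR1 : g.R + 1480 = g.RA := by
    unfold Ghost.R
    simp only [steady]
    omega
  obtain ⟨hS, hT, _, _⟩ := h.mid.arena.AR2
  have hben : ∀ w, w ∈ [(⟨rN - 256, rN⟩ : Span), ⟨g.f + 8, g.f + 12⟩, ⟨g.f + 128, g.f + 132⟩, ⟨g.f + 140, g.f + 144⟩,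
        ⟨g.f + 1400 + 8 * bN, g.f + 1408 + 8 * bN⟩, ⟨g.f + 1416 + 8 * bN, g.f + 1424 + 8 * bN⟩,
        ⟨g.f + 1432 + 8 * bN, g.f + 1440 + 8 * bN⟩, ⟨g.f + 1448 + 8 * bN, g.f + 1456 + 8 * bN⟩,
        ⟨g.f + 1464 + 8 * bN, g.f + 1472 + 8 * bN⟩, ⟨A.1.B + A.1.S, A.1.B + A.1.T⟩,
        shadowSpan (A.1.B + A.1.S) (A.1.B + A.1.T)] → Benign g A.1 w := by
    intro w hw
    simp only [List.mem_cons, List.mem_nil_iff, or_false] at hw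
    unfold Benign
    rcases hw with rfl | rfl | rfl | rfl | rfl | rfl | rfl | rfl | rfl | rfl | rfl <;>
      simp only [shadowSpan] <;> omega
  have hoffText : ∀ o, o ∈ others' → L.textHi ≤ o.base := by
    intro o ho
    rcases hsup o ho with h1 | h2
    · exact h.offText o h1
    · unfold Arena.setupObjs at h2
      obtain ⟨b, _, e⟩ := List.mem_map.mp h2
      rw [← e]
      unfold Arena.setupObj
      have hat : L.textHi ≤ A.1.B := h.hand.arenaText
      rw [hext.B]
      exact Nat.le_trans hat (Nat.le_add_right _ _)
  have hno : A'.temps = [] := by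
    rw [htemps]
    exact h.mid.noTemps
  refine ⟨core_carry (A' := (A', others')) h hext hs hben hshadow hoffText hsub harena hno, ?_, ?_⟩
  · intro b' hb'
    apply tabs_keep h (hold b' hb') (by omega) hs hben _ hext
    intro w hw
    simp only [List.mem_cons, List.mem_nil_iff, or_false] at hw
    rcases hw with rfl | rfl | rfl | rfl | rfl | rfl | rfl | rfl | rfl | rfl | rfl
    · have hb := hben ⟨rN - 256, rN⟩ List.mem_cons_self
      obtain ⟨hf1, hf2, hf3⟩ := f_where' h.shadow h.offText h.callers h.hand
      have hra2 : g.RA + 8 ≤ 0x800000 := h.entry.top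
      simp only []
      omega
    · simp only []
      omega
    · simp only []
      omega
    · simp only []
      omega
    · simp only []
      omega
    · simp only []
      omega
    · simp only []
      omega
    · simp only []
      omega
    · simp only []
      omega
    · have hout := h.hand.objOut
      obtain ⟨_, _, _, hAR1⟩ := h.mid.arena.AR1
      simp only [voff] at hout
      simp only []
      omega
    · obtain ⟨hf1, hf2, hf3⟩ := f_where' h.shadow h.offText h.callers h.hand
      simp only [shadowSpan]
      omega
  · obtain ⟨hobjeq, _, _⟩ := core_keep h hs hben
    have hsz : ObjEq [(152, 160)] m g.f m' g.f := by
      apply hobjeq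
      intro w hw
      simp only [List.mem_cons, List.mem_nil_iff, or_false] at hw
      subst hw
      simp only []
      omega
    intro c
    apply bsize_congr
    · simp only [vacc, voff]
      exact hsz.i32 152 (by decide)
    · simp only [vacc, voff]
      exact hsz.i32 156 (by decide)

/-- The block sizes read the same over a batch of `Benign` spans. -/
theorem bsize_keep {u₀ : State} {g : Ghost} {A9 A10 : Arena} {A : Arena × List Obj} {i : Nat} {mem mem' : Mem}
    (h : Carried u₀ g A9 A10 A i mem) {ws : List Span} (hs : Mem.SameExcept ws mem mem')
    (hws : ∀ w, w ∈ ws → Benign g A.1 w) (c : Nat) : bsize mem' g.f c = bsize mem g.f c := by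
  obtain ⟨hobjeq, _, _⟩ := core_keep h hs hws
  have hsz : ObjEq [(152, 160)] mem g.f mem' g.f := by
    apply hobjeq
    intro w hw
    simp only [List.mem_cons, List.mem_nil_iff, or_false] at hw
    subst hw
    simp only []
    omega
  apply bsize_congr
  · simp only [vacc, voff]
    exact hsz.i32 152 (by decide)
  · simp only [vacc, voff]
    exact hsz.i32 156 (by decide)

/-- **The assertion right after an `init_blocksize` returned** (0x115fc9 with `nb = 0`, 0x115ff0 with `nb = 1`): the steady frame,
`rbp = f`, the state-independent part for some grown ghost arena, `eax ∈ {0, 1}`, the tables of the indices below `nb`, and —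
when `eax = 1` — the tables of index `nb`. -/
def AtRetIB (u₀ : State) (g : Ghost) (pc : Word) (nb : Nat) (r : State) : Prop :=
  ∃ (A9 A10 : Arena) (A : Arena × List Obj) (i : Nat),
    r.rip = pc ∧ r.reg .rsp = addr g.R ∧ r.reg .rbp = addr g.f ∧ abiInv r ∧ Carried u₀ g A9 A10 A i r.mem ∧
    (r.reg .rax = 1 ∨ r.reg .rax = 0) ∧ (∀ b, b < nb → Tabs A10 A.1 r.mem g.f b) ∧
    (r.reg .rax = 1 → Tabs A10 A.1 r.mem g.f nb)

/-- The stack pointer of the cut points, in the walker's form. -/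
theorem rsp_word {g : Ghost} (hroom : 0x700000 + 1888 ≤ g.RA) : addr g.R = g.e.reg .rsp - 1480 := by
  have e : g.R = (g.e.reg .rsp).toNat - 1480 := rfl
  have hle : 1480 ≤ (g.e.reg .rsp).toNat := by
    have : g.RA = (g.e.reg .rsp).toNat := rfl
    omega
  rw [e]
  unfold addr
  rw [UInt64.ofNat_sub hle, UInt64.ofNat_toNat]
  rfl

/-- **An error exit** (`init_blocksize` returned 0 : `je 113b22`): SD.ERR from the state-independent part. -/
theorem bodyERR_of_core {u₀ : State} {g : Ghost} {A9 A10 : Arena} {A : Arena × List Obj} {i : Nat} {s : State}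
    (h : Carried u₀ g A9 A10 A i s.mem) (hrip : s.rip = pc_ERR) (hrsp : s.reg .rsp = addr g.R) (hinv : abiInv s)
    (hrax : (s.reg .rax).toNat % 2 ^ 32 = 0) : AtERR u₀ g s :=
  ⟨A, h.frame hrip hrsp hinv, h.hand, Or.inl ⟨hrax, h.mid.failed_late (by omega)⟩⟩

/-- **SD.11 ASSEMBLED: the entry assertion of R17** (0x116059) from the state-independent part, the tables of both
`init_blocksize`, the two stores of `blocksize[]`, the spill `max_part_read = 0`, and the registers `r15d = b1`, `r13 = 2·b1`. -/
theorem r17_of_core {u₀ : State} {g : Ghost} {A9 A10 : Arena} {A : Arena × List Obj} {i : Nat} {s : State}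
    (h : Carried u₀ g A9 A10 A i s.mem) (ht0 : Tabs A10 A.1 s.mem g.f 0) (ht1 : Tabs A10 A.1 s.mem g.f 1)
    (h20 : stb_vorbis.blocksize s.mem g.f 0 = stb_vorbis.blocksize_0 s.mem g.f)
    (h21 : stb_vorbis.blocksize s.mem g.f 1 = stb_vorbis.blocksize_1 s.mem g.f)
    (hrip : s.rip = pc_R17) (hrsp : s.reg .rsp = addr g.R) (hinv : abiInv s) (hrbp : s.reg .rbp = addr g.f)
    (hest : s.mem.u32 (g.R + 0x10) = 0) (hr15 : s.reg .r15 = addr (bsize s.mem g.f 1))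
    (hr13 : s.reg .r13 = addr (2 * bsize s.mem g.f 1)) : AtR17 u₀ g 0 s := by
  have hm := h.mid
  have hd3 : Mdct.HD3 s.mem g.f := HD3.toMdct hm.header.HD3
  have hlfl := hm.lfl (by omega) (by omega)
  have hown : OwnAll A9 A10 A.1 s.mem g.f := by
    refine ⟨h.ext9, h.ext10, hm.own, ?_, ?_, ?_⟩
    · apply h.chan.done
      rw [h.i_eq]
      exact Int.le_refl _
    · apply FY1.of_upTo h.fy (m := (stb_vorbis.floor_count s.mem g.f).toNat)
      · rw [h.i_eq]
        exact Int.le_refl _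
      · intro j hj
        apply hlfl.ge j
        omega
      · omega
    · exact Mdct.MdctOK.of_parts h20 h21 hd3 ht0.1 ht1.1 ht0.2 ht1.2
  have hlate : Late g 12 A9 A10 A s.mem :=
    ⟨hm.env, hm.consts.next (by omega) (by omega), hm.arena, hm.noTemps, hm.bits, hm.first, hm.discard0, hm.header, hown,
      hm.mode (by omega), h.prev0⟩
  refine ⟨A9, A10, A, h.frame hrip hrsp hinv, h.hand, hlate, hrbp, ?_, ?_, ?_, hr15, hr13⟩
  · exact hm.consts.z24 (by omega) (by omega)
  · have := (hm.own.residue (by omega)).R1.1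
    omega
  · rw [maxPartRead_zero]
    exact hest


/-- `f->blocksize[0]` as the walker reads it. -/
theorem blocksize0_word (mem : Mem) (g : Ghost) :
    stb_vorbis.blocksize mem g.f 0 = sint32 (mem.readLE (g.e.reg .rdi + 144) 4) := by
  simp only [vacc, voff, Mem.i32, Mem.u32, Nat.mul_zero, Nat.add_zero]
  rw [← addr_add_lit]
  unfold Ghost.f
  rw [addr_toNat]

/-- `f->blocksize[1]` as the walker reads it. -/
theorem blocksize1_word (mem : Mem) (g : Ghost) :
    stb_vorbis.blocksize mem g.f 1 = sint32 (mem.readLE (g.e.reg .rdi + 148) 4) := by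
  simp only [vacc, voff, Mem.i32, Mem.u32, Nat.mul_one]
  have e : g.f + 144 + 4 = g.f + 148 := by omega
  rw [e, ← addr_add_lit]
  unfold Ghost.f
  rw [addr_toNat]

/-- `f->blocksize_0` as the walker reads it. -/
theorem bs0_word (mem : Mem) (g : Ghost) :
    stb_vorbis.blocksize_0 mem g.f = sint32 (mem.readLE (g.e.reg .rdi + 152) 4) := by
  simp only [vacc, voff, Mem.i32, Mem.u32]
  rw [← addr_add_lit]
  unfold Ghost.f
  rw [addr_toNat]

/-- `f->blocksize_1` as the walker reads it. -/
theorem bs1_word (mem : Mem) (g : Ghost) :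
    stb_vorbis.blocksize_1 mem g.f = sint32 (mem.readLE (g.e.reg .rdi + 156) 4) := by
  simp only [vacc, voff, Mem.i32, Mem.u32]
  rw [← addr_add_lit]
  unfold Ghost.f
  rw [addr_toNat]

/-- A spill slot `[R + k]` of the steady frame, in the walker's form `rsp₀ - (1480 - k)`. -/
theorem slot_word {g : Ghost} (hroom : 0x700000 + 1888 ≤ g.RA) (k : Nat) (hk : k ≤ 1480) :
    addr (g.R + k) = g.e.reg .rsp - UInt64.ofNat (1480 - k) := by
  have e : g.R + k = (g.e.reg .rsp).toNat - (1480 - k) := by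
    have e1 : g.R = (g.e.reg .rsp).toNat - 1480 := rfl
    have e2 : g.RA = (g.e.reg .rsp).toNat := rfl
    omega
  have hle : 1480 - k ≤ (g.e.reg .rsp).toNat := by
    have : g.RA = (g.e.reg .rsp).toNat := rfl
    omega
  rw [e]
  unfold addr
  rw [UInt64.ofNat_sub hle, UInt64.ofNat_toNat]

/-- `r13 = (sext(b1) << 2) >> 1 = 2·b1` for a block size. -/
theorem r13_val (n : Nat) (hn : n ≤ 8192) :
    Word.ofBV (BitVec.signExtend 64 (BitVec.ofNat 32 n)) <<< 2 >>> 1 = addr (2 * n) := by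
  have hx : (BitVec.ofNat 32 n).toNat = n := by
    rw [BitVec.toNat_ofNat]
    omega
  have h1 : (Word.ofBV (BitVec.signExtend 64 (BitVec.ofNat 32 n))).toNat = n := by
    rw [Vorbis.Spec.toNat_sext32 _ (by omega), hx]
  apply eq_addr
  rw [UInt64.toNat_shiftRight, UInt64.toNat_shiftLeft, h1]
  have e2 : (2 : UInt64).toNat % 64 = 2 := by decide
  have e1 : (1 : UInt64).toNat % 64 = 1 := by decide
  rw [e2, e1, Nat.shiftLeft_eq, Nat.shiftRight_eq_div_pow]
  omega

/-- `r15d = b1` as a word. -/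
theorem r15_val (n : Nat) (hn : n ≤ 8192) : Word.ofBV (BitVec.ofNat 32 n) = addr n := by
  apply eq_addr
  rw [Vorbis.toNat_ofBV32, BitVec.toNat_ofNat]
  omega


end Vorbis.Spec.start_decoder_R15
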